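-- pv_equiv track=rewrite | github.com/jwo0o0/Algorithm | Baekjoon/스택, 큐, 덱/3986번 좋은 단어.py | good_word
-- ===== SOURCE A (Python) =====
-- def good_word(word):
--     stack = []
--     for w in word:
--         if (len(stack) == 0):
--             stack.append(w)
--         else:
--             if (stack[-1] == w):
--                 stack.pop()
--             else:
--                 stack.append(w)
--     return True if len(stack) == 0 else False
-- ===== SOURCE B (Python) =====
-- def good_word(word):
--     s = word
--     while True:
--         found = -1
--         i = 0
--         while i + 1 < len(s):
--             if s[i] == s[i + 1]:
--                 found = i
--                 break
--             i += 1
--         if found == -1: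
--             break
--         s = s[:found] + s[found + 2:]
--     return s == ""
-- ===== Notes on version B (the rewrite author's own statement) =====
-- stated objective: alternative
-- what changed: Replaced the single left-to-right stack pass with a fixpoint loop that repeatedly finds and deletes the first adjacent equal pair until none remain, then tests emptiness (correct by confluence of adjacent-pair elimination).
import Mathlib
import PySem

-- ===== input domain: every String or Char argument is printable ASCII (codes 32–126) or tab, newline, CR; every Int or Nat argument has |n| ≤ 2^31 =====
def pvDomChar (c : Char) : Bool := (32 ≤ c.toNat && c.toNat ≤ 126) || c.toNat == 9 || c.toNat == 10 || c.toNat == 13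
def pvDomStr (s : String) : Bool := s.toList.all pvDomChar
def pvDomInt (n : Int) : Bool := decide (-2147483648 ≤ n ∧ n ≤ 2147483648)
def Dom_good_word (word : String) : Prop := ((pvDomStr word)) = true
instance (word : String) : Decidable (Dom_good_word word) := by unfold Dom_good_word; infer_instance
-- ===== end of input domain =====

-- B replaces A's single stack pass by a fixpoint of repeated first-adjacent-pair deletions; alternative decomposition, not faster.

-- ===== PORT A =====
-- the loop body: stack empty → append; top == w → pop; else append (stack grows at the end, as in Python)
def goodStep (stack : List Char) (w : Char) : List Char :=
  if stack.length = 0 then stack ++ [w]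
  else if stack.getLast? = some w then stack.dropLast
  else stack ++ [w]

def good_word (word : String) : Bool :=
  let stack := word.toList.foldl goodStep []
  if stack.length = 0 then true else false

-- ===== PORT B =====
-- inner while loop of Source B: index of the first adjacent equal pair, none if there is none
def findAdj : List Char → Option Nat
  | a :: b :: rest => if a = b then some 0 else (findAdj (b :: rest)).map (· + 1)
  | _ => none

theorem findAdj_lt {cs : List Char} {i : Nat} (h : findAdj cs = some i) : i + 1 < cs.length := by
  induction cs generalizing i with
  | nil => simp [findAdj] at h
  | cons a cs ih =>
    match cs, h with
    | [], h => simp [findAdj] at h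
    | b :: rest, h =>
      by_cases hab : a = b
      · simp [findAdj, hab] at h
        simp only [List.length_cons]; omega
      · simp [findAdj, hab] at h
        obtain ⟨j, hj, rfl⟩ := h
        have := ih hj; simp only [List.length_cons] at this ⊢; omega

-- outer while loop of Source B: delete the found pair (s = s[:found] + s[found+2:]) and restart
def reduceAll (cs : List Char) : List Char :=
  match _h : findAdj cs with
  | none => cs
  | some i => reduceAll (cs.take i ++ cs.drop (i + 2))
termination_by cs.length
decreasing_by
  have := findAdj_lt _h
  simp [List.length_take, List.length_drop]
  omega

def good_word_alt (word : String) : Bool := reduceAll word.toList == []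

-- ===== PRECONDITION & SPEC =====
def Spec_good_word (word : String) (out : Bool) : Prop := out = good_word_alt word
instance (word : String) (out : Bool) : Decidable (Spec_good_word word out) := by unfold Spec_good_word; infer_instance

-- ===== CLAIM (what is proved, stated in full; the proofs are below) =====
def Claim_equal_good_word : Prop := ∀ (word : String), Dom_good_word word → Spec_good_word word (good_word word)

-- ===== LEMMAS AND PROOFS =====

-- top-at-head version of A's step, used only in the proofs
def stepR (t : List Char) (a : Char) : List Char :=
  match t with
  | [] => [a]
  | b :: t' => if b = a then t' else a :: b :: t'

theorem goodStep_eq_stepR (s : List Char) (a : Char) :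
    goodStep s a = (stepR s.reverse a).reverse := by
  rcases h : s.reverse with _ | ⟨b, t⟩
  · have : s = [] := by simpa using congrArg List.reverse h
    subst this; simp [goodStep, stepR]
  · have hs : s = (b :: t).reverse := by
      have := congrArg List.reverse h; simpa using this
    subst hs
    by_cases hba : b = a
    · simp [goodStep, stepR, hba]
    · have hga : (t.reverse ++ [b]).getLast? = some b := List.getLast?_concat
      simp [goodStep, stepR, hba, hga]

theorem foldl_goodStep_eq (cs : List Char) (s : List Char) :
    cs.foldl goodStep s = (cs.foldl stepR s.reverse).reverse := by
  induction cs generalizing s with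
  | nil => simp
  | cons c cs ih =>
    simp only [List.foldl_cons, goodStep_eq_stepR]
    rw [ih]; simp

-- stepR keeps the stack free of adjacent duplicates
theorem chain_stepR {t : List Char} (h : List.IsChain (· ≠ ·) t) (a : Char) :
    List.IsChain (· ≠ ·) (stepR t a) := by
  match t with
  | [] => exact List.IsChain.singleton a
  | b :: t' =>
    by_cases hba : b = a
    · simpa [stepR, hba] using h.of_cons
    · have hch : List.IsChain (· ≠ ·) (a :: b :: t') := List.isChain_cons_cons.mpr ⟨Ne.symm hba, h⟩
      simpa [stepR, hba] using hch

theorem chain_foldl_stepR {t : List Char} (h : List.IsChain (· ≠ ·) t) (cs : List Char) :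
    List.IsChain (· ≠ ·) (cs.foldl stepR t) := by
  induction cs generalizing t with
  | nil => exact h
  | cons c cs ih => exact ih (chain_stepR h c)

-- pushing the same char twice onto a duplicate-free stack is a no-op
theorem stepR_stepR {t : List Char} (h : List.IsChain (· ≠ ·) t) (a : Char) :
    stepR (stepR t a) a = t := by
  match t with
  | [] => simp [stepR]
  | b :: t' =>
    by_cases hba : b = a
    · subst hba
      match t' with
      | [] => simp [stepR]
      | c :: t'' =>
        have hbc : b ≠ c := (List.isChain_cons_cons.mp h).1
        simp [stepR, Ne.symm hbc]
    · simp [stepR, hba]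

-- deleting an adjacent equal pair does not change the stack result
theorem foldl_stepR_pair (xs ys : List Char) (a : Char) :
    (xs ++ a :: a :: ys).foldl stepR [] = (xs ++ ys).foldl stepR [] := by
  rw [List.foldl_append, List.foldl_append]
  simp only [List.foldl_cons]
  rw [stepR_stepR (chain_foldl_stepR List.IsChain.nil xs)]

-- a chain with no adjacent duplicates reaches the stack unreduced
theorem foldl_stepR_chain (cs t : List Char)
    (hc : List.IsChain (· ≠ ·) cs)
    (hb : ∀ b ∈ t.head?, ∀ c ∈ cs.head?, b ≠ c) :
    cs.foldl stepR t = cs.reverse ++ t := by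
  induction cs generalizing t with
  | nil => simp
  | cons c cs ih =>
    have hstep : stepR t c = c :: t := by
      match t with
      | [] => simp [stepR]
      | b :: t' =>
        have : b ≠ c := hb b (by simp) c (by simp)
        simp [stepR, this]
    simp only [List.foldl_cons, hstep]
    rw [ih (c :: t) hc.of_cons ?_]
    · simp
    · intro b hbmem d hd
      simp at hbmem
      rcases hbmem with rfl
      rcases cs with _ | ⟨e, cs⟩
      · simp at hd
      · simp at hd; subst hd
        exact (List.isChain_cons_cons.mp hc).1

theorem findAdj_none_chain {cs : List Char} (h : findAdj cs = none) :
    List.IsChain (· ≠ ·) cs := by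
  induction cs with
  | nil => exact List.IsChain.nil
  | cons a cs ih =>
    match cs with
    | [] => exact List.IsChain.singleton a
    | b :: rest =>
      by_cases hab : a = b
      · simp [findAdj, hab] at h
      · simp [findAdj, hab] at h
        exact List.isChain_cons_cons.mpr ⟨hab, ih (by simp [h])⟩

theorem findAdj_some_decomp {cs : List Char} {i : Nat} (h : findAdj cs = some i) :
    ∃ xs a ys, cs = xs ++ a :: a :: ys ∧ xs.length = i := by
  induction cs generalizing i with
  | nil => simp [findAdj] at h
  | cons a cs ih =>
    match cs with
    | [] => simp [findAdj] at h
    | b :: rest =>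
      by_cases hab : a = b
      · simp [findAdj, hab] at h
        exact ⟨[], b, rest, by simp [hab], by simp [← h]⟩
      · simp [findAdj, hab] at h
        obtain ⟨j, hj, rfl⟩ := h
        obtain ⟨xs, x, ys, hcs, hlen⟩ := ih hj
        exact ⟨a :: xs, x, ys, by simp [hcs], by simp [hlen]⟩

-- main bridge: the stack is empty iff the fixpoint reduction is empty
theorem stack_empty_iff_reduce (cs : List Char) :
    (cs.foldl stepR [] = []) ↔ (reduceAll cs = []) := by
  induction hn : cs.length using Nat.strong_induction_on generalizing cs with
  | _ n ih =>
  rw [reduceAll]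
  split
  · next h =>
    rw [foldl_stepR_chain cs [] (findAdj_none_chain h) (by simp)]
    simp
  · next i h =>
    obtain ⟨xs, a, ys, rfl, hlen⟩ := findAdj_some_decomp h
    have htake : (xs ++ a :: a :: ys).take i = xs := by
      rw [← hlen, List.take_left]
    have hdrop : (xs ++ a :: a :: ys).drop (i + 2) = ys := by
      rw [← hlen]
      rw [show xs.length + 2 = (xs ++ [a, a]).length by simp]
      rw [show xs ++ a :: a :: ys = (xs ++ [a, a]) ++ ys by simp]
      exact List.drop_left ..
    rw [htake, hdrop, foldl_stepR_pair]
    exact ih (xs ++ ys).length (by subst hn; simp only [List.length_append, List.length_cons]; omega) _ rfl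

-- ===== VERDICT (by name: the statement is the Claim_ definition above) =====
theorem good_word_spec : Claim_equal_good_word := by
  intro word _
  unfold Spec_good_word good_word good_word_alt
  rw [foldl_goodStep_eq]
  simp only [List.reverse_nil]
  rcases h : reduceAll word.toList with _ | _
  · have : word.toList.foldl stepR [] = [] := (stack_empty_iff_reduce _).mpr h
    simp [this]
  · have : word.toList.foldl stepR [] ≠ [] := by
      intro he
      rw [(stack_empty_iff_reduce _).mp he] at h
      simp at h
    simp [this, List.length_eq_zero_iff]
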